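-- pv_equiv track=rewrite | github.com/ArtemKatsalov/PodstawyProgramowania | 04-Functions/room_detector.py | f
-- ===== SOURCE A (Python) =====
-- def f(detector):
--     people = 0
--     max_people = 0
--
--     for char in detector:
--         if char == "+":
--             people += 1
--         elif char == "-":
--             people -= 1
--         max_people = max(max_people, people)
--
--     return max_people >= 3
-- ===== SOURCE B (Python) =====
-- def f(detector):
--     # Divide and conquer: for a segment return (sum of deltas, max prefix sum
--     # of the segment counting the empty prefix as 0). Combine rule:
--     # maxpref(L++R) = max(maxpref(L), sum(L) + maxpref(R)).
--     def go(i, j):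
--         if j - i <= 1:
--             if j - i == 0:
--                 return (0, 0)
--             d = 1 if detector[i] == "+" else -1 if detector[i] == "-" else 0
--             return (d, max(0, d))
--         m = (i + j) // 2
--         sL, pL = go(i, m)
--         sR, pR = go(m, j)
--         return (sL + sR, max(pL, sL + pR))
--     return go(0, len(detector))[1] >= 3
-- ===== Notes on version B (the rewrite author's own statement) =====
-- stated objective: alternative
-- what changed: Replaces A's single left-to-right scan that updates people and max_people inline with a divide-and-conquer recursion: each half of the string yields a (delta-sum, max-prefix-sum) pair and the pairs are combined by maxpref(L++R) = max(maxpref L, sum L + maxpref R); the room ever holds >=3 people iff the max prefix sum (with empty prefix 0) is >=3.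
import Mathlib
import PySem

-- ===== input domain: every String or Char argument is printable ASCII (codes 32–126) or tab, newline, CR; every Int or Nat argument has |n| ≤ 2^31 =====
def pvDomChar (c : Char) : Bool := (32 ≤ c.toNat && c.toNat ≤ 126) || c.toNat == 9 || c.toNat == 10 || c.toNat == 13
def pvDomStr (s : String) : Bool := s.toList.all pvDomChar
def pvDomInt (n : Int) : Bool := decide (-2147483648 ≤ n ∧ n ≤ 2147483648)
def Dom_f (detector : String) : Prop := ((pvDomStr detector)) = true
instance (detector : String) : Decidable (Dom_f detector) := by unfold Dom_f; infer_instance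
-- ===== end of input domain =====

-- B replaces A's single scan by a divide-and-conquer recursion on (delta-sum, max-prefix-sum) pairs (alternative algorithm, same O(n)).

-- ===== PORT A =====
-- one loop step of A: update people, then max_people
def fStep (s : Int × Int) (c : Char) : Int × Int :=
  let p := if c = '+' then s.1 + 1 else if c = '-' then s.1 - 1 else s.1
  (p, max s.2 p)

def f (detector : String) : Bool :=
  decide ((detector.toList.foldl fStep (0, 0)).2 ≥ 3)

-- ===== PORT B =====
-- delta of one character (Source B's inline conditional)
def fDelta (c : Char) : Int := if c = '+' then 1 else if c = '-' then -1 else 0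

-- Source B's go(i, j) on the sublist detector[i:j]; splitting at m = (i+j)//2 is
-- splitting the sublist after (length/2) elements, i.e. take/drop (length/2).
def fGo (l : List Char) : Int × Int :=
  if l.length ≤ 1 then
    match l with
    | [] => (0, 0)
    | c :: _ => (fDelta c, max 0 (fDelta c))
  else
    let L := fGo (l.take (l.length / 2))
    let R := fGo (l.drop (l.length / 2))
    (L.1 + R.1, max L.2 (L.1 + R.2))
termination_by l.length
decreasing_by
  · simp only [List.length_take]; omega
  · simp only [List.length_drop]; omega

def f_alt (detector : String) : Bool :=
  decide ((fGo detector.toList).2 ≥ 3)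

-- ===== PRECONDITION & SPEC =====
def Spec_f (detector : String) (out : Bool) : Prop := out = f_alt detector
instance (detector : String) (out : Bool) : Decidable (Spec_f detector out) := by unfold Spec_f; infer_instance

-- ===== CLAIM (what is proved, stated in full; the proofs are below) =====
def Claim_equal_f : Prop := ∀ (detector : String), Dom_f detector → Spec_f detector (f detector)

-- ===== LEMMAS AND PROOFS =====

-- sum of deltas of a segment
def fS (l : List Char) : Int := (l.map fDelta).sum

-- max prefix sum of a segment, counting the empty prefix as 0
def fP : List Char → Int
  | [] => 0
  | c :: t => max 0 (fDelta c + fP t)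

theorem fP_nonneg (l : List Char) : 0 ≤ fP l := by
  cases l with
  | nil => simp [fP]
  | cons c t => simp [fP]

theorem fP_append (a b : List Char) : fP (a ++ b) = max (fP a) (fS a + fP b) := by
  induction a with
  | nil => simp [fP, fS, max_eq_right (fP_nonneg b)]
  | cons c t ih =>
      simp only [List.cons_append, fP, ih, fS, List.map_cons, List.sum_cons]
      omega

theorem fGo_eq (l : List Char) : fGo l = (fS l, fP l) := by
  fun_induction fGo l with
  | case1 hle =>
      simp [fS, fP]
  | case2 c t hle =>
      -- length ≤ 1, so t = []
      cases t with
      | nil => simp [fS, fP]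
      | cons _ _ => simp at hle
  | case3 l hne LL RR ihL ihR =>
      have hsplit := List.take_append_drop (l.length / 2) l
      have hS : fS l = fS (l.take (l.length / 2)) + fS (l.drop (l.length / 2)) := by
        conv_lhs => rw [← hsplit]
        simp [fS]
      have hP : fP l = max (fP (l.take (l.length / 2))) (fS (l.take (l.length / 2)) + fP (l.drop (l.length / 2))) := by
        conv_lhs => rw [← hsplit]
        exact fP_append _ _
      simp only [LL, RR, ihL, ihR, hS, hP]

-- A's fold computes max m (p + max-prefix-sum), given the invariant p ≤ m
theorem fold_eq_fP (l : List Char) (p m : Int) (h : p ≤ m) :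
    (l.foldl fStep (p, m)).2 = max m (p + fP l) := by
  induction l generalizing p m with
  | nil => simp [fP, max_eq_left h]
  | cons c t ih =>
      have hstep : fStep (p, m) c = (p + fDelta c, max m (p + fDelta c)) := by
        simp only [fStep, fDelta]
        split_ifs <;> simp [sub_eq_add_neg]
      simp only [List.foldl_cons, hstep]
      rw [ih _ _ (le_max_right _ _)]
      simp only [fP]
      have := fP_nonneg t
      omega

-- ===== VERDICT (by name: the statement is the Claim_ definition above) =====
theorem f_spec : Claim_equal_f := by
  intro detector _
  unfold Spec_f f f_alt
  rw [fold_eq_fP detector.toList 0 0 le_rfl, fGo_eq]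
  have h := fP_nonneg detector.toList
  simp only [zero_add, max_eq_right h]
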